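-- pv_equiv track=rewrite | github.com/WhymustIhaveaname/nerd-dictation | scripts/clean_user_dict.py | _fuzzy_eq
-- ===== SOURCE A (Python) =====
-- _FUZZY_INITIALS = [("zh", "z"), ("ch", "c"), ("sh", "s")]
--
-- _FUZZY_FINALS = [("eng", "en"), ("ing", "in"), ("ang", "an")]
--
-- def _fuzzy_eq(a, b):
--     """Check if two pinyin syllables are fuzzy-equal."""
--     for x, y in _FUZZY_INITIALS:
--         if a.startswith(x) and b.startswith(y) and a[len(x):] == b[len(y):]:
--             return True
--         if a.startswith(y) and b.startswith(x) and a[len(y):] == b[len(x):]: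
--             return True
--     for x, y in _FUZZY_FINALS:
--         if a.endswith(x) and b.endswith(y) and a[:-len(x)] == b[:-len(y)]:
--             return True
--         if a.endswith(y) and b.endswith(x) and a[:-len(y)] == b[:-len(x)]:
--             return True
--     return False
-- ===== SOURCE B (Python) =====
-- _FUZZY_INITIALS = [("zh", "z"), ("ch", "c"), ("sh", "s")]
--
-- _FUZZY_FINALS = [("eng", "en"), ("ing", "in"), ("ang", "an")]
--
-- def _fuzzy_eq(a, b):
--     """Check if two pinyin syllables are fuzzy-equal: generate every
--     single-rule fuzzy variant of `a`, then test `b` for membership."""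
--     variants = set()
--     for x, y in _FUZZY_INITIALS:
--         if a.startswith(x):
--             variants.add(y + a[len(x):])
--         if a.startswith(y):
--             variants.add(x + a[len(y):])
--     for x, y in _FUZZY_FINALS:
--         if a.endswith(x):
--             variants.add(a[:-len(x)] + y)
--         if a.endswith(y):
--             variants.add(a[:-len(y)] + x)
--     return b in variants
-- ===== Notes on version B (the rewrite author's own statement) =====
-- stated objective: alternative
-- what changed: A tests four in-line prefix/suffix comparisons per rule pair against b; B instead generates the set of all single-rule fuzzy variants of a and returns a membership test of b in that set.
import Mathlib
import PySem

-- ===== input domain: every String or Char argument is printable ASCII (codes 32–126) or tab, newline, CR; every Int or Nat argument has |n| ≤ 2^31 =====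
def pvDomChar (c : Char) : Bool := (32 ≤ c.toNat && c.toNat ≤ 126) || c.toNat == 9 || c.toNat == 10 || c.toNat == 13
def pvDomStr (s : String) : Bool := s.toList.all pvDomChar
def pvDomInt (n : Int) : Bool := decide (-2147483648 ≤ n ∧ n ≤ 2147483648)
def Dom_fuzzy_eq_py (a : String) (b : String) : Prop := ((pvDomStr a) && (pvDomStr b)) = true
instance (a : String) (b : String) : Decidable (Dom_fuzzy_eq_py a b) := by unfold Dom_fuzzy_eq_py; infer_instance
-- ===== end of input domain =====

-- B replaces A's four in-line prefix/suffix comparisons per rule pair by generating the set of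
-- single-rule fuzzy variants of `a` and testing `b` for membership (alternative decomposition, same cost).


-- ===== PORT A =====
def pvFuzzyInitials : List (String × String) := [("zh", "z"), ("ch", "c"), ("sh", "s")]
def pvFuzzyFinals : List (String × String) := [("eng", "en"), ("ing", "in"), ("ang", "an")]

-- the first 'for' loop of A, with its early returns
def pvInitLoop (a b : String) : List (String × String) → Bool
  | [] => false
  | (x, y) :: rest =>
    if PySem.Str.startswith a x && PySem.Str.startswith b y &&
        (PySem.Str.slice a (some (PySem.Str.len x)) none == PySem.Str.slice b (some (PySem.Str.len y)) none) then
      true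
    else if PySem.Str.startswith a y && PySem.Str.startswith b x &&
        (PySem.Str.slice a (some (PySem.Str.len y)) none == PySem.Str.slice b (some (PySem.Str.len x)) none) then
      true
    else pvInitLoop a b rest

-- the second 'for' loop of A, with its early returns
def pvFinLoop (a b : String) : List (String × String) → Bool
  | [] => false
  | (x, y) :: rest =>
    if PySem.Str.endswith a x && PySem.Str.endswith b y &&
        (PySem.Str.slice a none (some (-(PySem.Str.len x))) == PySem.Str.slice b none (some (-(PySem.Str.len y)))) then
      true
    else if PySem.Str.endswith a y && PySem.Str.endswith b x &&
        (PySem.Str.slice a none (some (-(PySem.Str.len y))) == PySem.Str.slice b none (some (-(PySem.Str.len x)))) then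
      true
    else pvFinLoop a b rest

def fuzzy_eq_py (a : String) (b : String) : Bool :=
  if pvInitLoop a b pvFuzzyInitials then true else pvFinLoop a b pvFuzzyFinals

-- ===== PORT B =====
-- the set of single-rule fuzzy variants of `a` (Source B's `variants`)
def pvVariants (a : String) : PySem.Set String :=
  let s : PySem.Set String := PySem.Set.empty
  let s := pvFuzzyInitials.foldl (fun s p =>
    let s := if PySem.Str.startswith a p.1 then
        PySem.Set.add s (p.2 ++ PySem.Str.slice a (some (PySem.Str.len p.1)) none) else s
    if PySem.Str.startswith a p.2 then
        PySem.Set.add s (p.1 ++ PySem.Str.slice a (some (PySem.Str.len p.2)) none) else s) s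
  pvFuzzyFinals.foldl (fun s p =>
    let s := if PySem.Str.endswith a p.1 then
        PySem.Set.add s (PySem.Str.slice a none (some (-(PySem.Str.len p.1))) ++ p.2) else s
    if PySem.Str.endswith a p.2 then
        PySem.Set.add s (PySem.Str.slice a none (some (-(PySem.Str.len p.2))) ++ p.1) else s) s

def fuzzy_eq_py_alt (a : String) (b : String) : Bool :=
  PySem.Set.contains (pvVariants a) b

-- ===== PRECONDITION & SPEC =====
def Spec_fuzzy_eq_py (a : String) (b : String) (out : Bool) : Prop := out = fuzzy_eq_py_alt a b
instance (a : String) (b : String) (out : Bool) : Decidable (Spec_fuzzy_eq_py a b out) := by unfold Spec_fuzzy_eq_py; infer_instance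

-- ===== CLAIM (what is proved, stated in full; the proofs are below) =====
def Claim_equal_fuzzy_eq_py : Prop := ∀ (a : String) (b : String), Dom_fuzzy_eq_py a b → Spec_fuzzy_eq_py a b (fuzzy_eq_py a b)

-- ===== LEMMAS AND PROOFS =====

theorem pvIfOr (c d : Bool) : (if c then true else d) = (c || d) := by
  cases c <;> simp

theorem pvBeqDecide (t v : String) : (t == v) = decide (t = v) := by
  by_cases h : t = v <;> simp [h]

theorem pvContainsCondAdd (c : Bool) (s : PySem.Set String) (v t : String) :
    PySem.Set.contains (if c then PySem.Set.add s v else s) t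
      = (PySem.Set.contains s t || (c && (t == v))) := by
  cases c <;> simp [PySem.Set.mem_add, pvBeqDecide, PySem.Set.contains]

theorem pvPreRule (a b x y : String) :
    (PySem.Str.startswith a x && PySem.Str.startswith b y &&
      (PySem.Str.slice a (some (PySem.Str.len x)) none == PySem.Str.slice b (some (PySem.Str.len y)) none))
    = (PySem.Str.startswith a x && (b == y ++ PySem.Str.slice a (some (PySem.Str.len x)) none)) := by
  rw [Bool.eq_iff_iff]
  simp only [Bool.and_eq_true, beq_iff_eq, PySem.Str.startswith_eq, PySem.Chars.startswith_iff,
    ← String.toList_inj, String.toList_append, PySem.Str.toList_slice,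
    PySem.Chars.slice_eq_listSlice, PySem.Str.len_eq, PySem.List.slice_from_natCast]
  constructor
  · rintro ⟨⟨hx, hy⟩, he⟩
    obtain ⟨r, hr⟩ := hy
    refine ⟨hx, ?_⟩
    have hd : List.drop y.toList.length b.toList = r := by
      rw [← hr]; exact List.drop_left
    rw [he, hd, hr]
  · rintro ⟨hx, hb⟩
    refine ⟨⟨hx, ?_⟩, ?_⟩
    · rw [hb]; exact List.prefix_append _ _
    · rw [hb]; exact (List.drop_left).symm

theorem pvSufRule (a b x y : String) (hx : 0 < x.toList.length) (hy : 0 < y.toList.length) :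
    (PySem.Str.endswith a x && PySem.Str.endswith b y &&
      (PySem.Str.slice a none (some (-(PySem.Str.len x))) == PySem.Str.slice b none (some (-(PySem.Str.len y)))))
    = (PySem.Str.endswith a x && (b == PySem.Str.slice a none (some (-(PySem.Str.len x))) ++ y)) := by
  rw [Bool.eq_iff_iff]
  simp only [Bool.and_eq_true, beq_iff_eq, PySem.Str.endswith_eq, PySem.Chars.endswith_iff,
    ← String.toList_inj, String.toList_append, PySem.Str.toList_slice,
    PySem.Chars.slice_eq_listSlice, PySem.Str.len_eq]
  rw [PySem.List.slice_to_neg_natCast _ _ hx, PySem.List.slice_to_neg_natCast _ _ hy]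
  constructor
  · rintro ⟨⟨hxa, hyb⟩, he⟩
    obtain ⟨r, hr⟩ := hyb
    refine ⟨hxa, ?_⟩
    have hlen : (r ++ y.toList).length - y.toList.length = r.length := by simp
    have ht : List.take (b.toList.length - y.toList.length) b.toList = r := by
      rw [← hr, hlen]; exact List.take_left
    rw [he, ht, hr]
  · rintro ⟨hxa, hb⟩
    refine ⟨⟨hxa, ?_⟩, ?_⟩
    · rw [hb]; exact List.suffix_append _ _
    · rw [hb]
      have hlen : (List.take (a.toList.length - x.toList.length) a.toList ++ y.toList).length - y.toList.length
          = (List.take (a.toList.length - x.toList.length) a.toList).length := by simp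
      rw [hlen, List.take_left]

theorem pvContainsNil (t : String) : PySem.Set.contains ([] : PySem.Set String) t = false := rfl

theorem pvMain (a b : String) : fuzzy_eq_py a b = fuzzy_eq_py_alt a b := by
  have e1 := pvSufRule a b "eng" "en" (by decide) (by decide)
  have e2 := pvSufRule a b "en" "eng" (by decide) (by decide)
  have e3 := pvSufRule a b "ing" "in" (by decide) (by decide)
  have e4 := pvSufRule a b "in" "ing" (by decide) (by decide)
  have e5 := pvSufRule a b "ang" "an" (by decide) (by decide)
  have e6 := pvSufRule a b "an" "ang" (by decide) (by decide)
  unfold fuzzy_eq_py fuzzy_eq_py_alt pvVariants pvFuzzyInitials pvFuzzyFinals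
  simp only [pvInitLoop, pvFinLoop, List.foldl, pvIfOr, pvContainsCondAdd,
    PySem.Set.empty, pvContainsNil, Bool.false_or, Bool.or_false,
    pvPreRule, e1, e2, e3, e4, e5, e6, Bool.or_assoc]

-- ===== VERDICT (by name: the statement is the Claim_ definition above) =====
theorem fuzzy_eq_py_spec : Claim_equal_fuzzy_eq_py := by
  intro a b _
  unfold Spec_fuzzy_eq_py
  exact pvMain a b
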